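-- pv_equiv track=rewrite | github.com/David-Hakobyan1/Different | xaxer/norik.py | filter_file
-- ===== SOURCE A (Python) =====
-- def filter_file(mlist):
--     st=""
--     l=[]
--     for el in mlist:
--         if el != "\n":
--             st+=el
--         else:
--             lis=st.split("-")
--             l.append(lis)
--             st=""
--     return l
-- ===== SOURCE B (Python) =====
-- def filter_file(mlist):
--     records = []
--     rest = mlist
--     while "\n" in rest:
--         j = rest.index("\n")
--         records.append("".join(rest[:j]).split("-"))
--         rest = rest[j + 1:]
--     return records
-- ===== Notes on version B (the rewrite author's own statement) =====
-- stated objective: alternative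
-- what changed: B repeatedly locates the next newline sentinel with list.index and processes a whole record at once (slice, join, split) instead of A's element-by-element loop growing a string accumulator.
import Mathlib
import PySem

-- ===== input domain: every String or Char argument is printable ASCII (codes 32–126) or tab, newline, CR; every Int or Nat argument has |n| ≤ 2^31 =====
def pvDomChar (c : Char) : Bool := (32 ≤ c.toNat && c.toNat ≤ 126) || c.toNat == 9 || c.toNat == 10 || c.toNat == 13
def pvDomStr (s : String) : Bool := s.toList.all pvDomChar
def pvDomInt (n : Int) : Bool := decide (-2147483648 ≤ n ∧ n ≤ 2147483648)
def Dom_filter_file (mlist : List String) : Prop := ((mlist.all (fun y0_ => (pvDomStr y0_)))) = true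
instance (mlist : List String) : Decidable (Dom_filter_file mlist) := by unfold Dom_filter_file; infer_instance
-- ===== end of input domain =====

-- B replaces A's per-element string accumulator by a sentinel search: find the next "\n"
-- element, join and split the whole record at once, continue on the remainder (objective: alternative).

-- st.split("-"): sep "-" is nonempty, so Python never raises; split? is some here, getD [] is exact.
def pySplit (s : String) : List String := (PySem.Str.split? s "-").getD []

-- ===== PORT A =====
-- the loop body of A (named so the fold invariant below can speak about it)
def stepA (acc : String × List (List String)) (el : String) : String × List (List String) :=
  if el ≠ "\n" then (acc.1 ++ el, acc.2)
  else ("", acc.2 ++ [pySplit acc.1])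

def filter_file (mlist : List String) : List (List String) :=
  (mlist.foldl stepA ("", ([] : List (List String)))).2

-- ===== PORT B =====
-- the while-loop of Source B: '"\n" in rest' and 'rest.index("\n")' are the one index? match;
-- rest[:j] with j : Nat is rest.take j, rest[j+1:] is rest.drop (j+1) — exact for 0 ≤ j.
def filterAltGo (records : List (List String)) (rest : List String) : List (List String) :=
  match h : PySem.List.index? rest "\n" with
  | none => records
  | some j =>
    filterAltGo (records ++ [pySplit (PySem.Str.join "" (rest.take j))]) (rest.drop (j + 1))
termination_by rest.length
decreasing_by
  obtain ⟨pre, suf, hre, hlen, -⟩ := (PySem.List.index?_eq_some_iff rest "\n" j).mp h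
  subst hre
  simp only [List.length_drop, List.length_append, List.length_cons]
  omega

def filter_file_alt (mlist : List String) : List (List String) :=
  filterAltGo [] mlist

-- ===== PRECONDITION & SPEC =====
def Spec_filter_file (mlist : List String) (out : List (List String)) : Prop := out = filter_file_alt mlist
instance (mlist : List String) (out : List (List String)) : Decidable (Spec_filter_file mlist out) := by unfold Spec_filter_file; infer_instance

-- ===== CLAIM (what is proved, stated in full; the proofs are below) =====
def Claim_equal_filter_file : Prop := ∀ (mlist : List String), Dom_filter_file mlist → Spec_filter_file mlist (filter_file mlist)

-- ===== LEMMAS AND PROOFS =====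

-- reference recursion: A's loop with pending accumulator st
def goSpec (st : String) : List String → List (List String)
  | [] => []
  | el :: xs => if el = "\n" then pySplit st :: goSpec "" xs else goSpec (st ++ el) xs

lemma foldA_eq (xs : List String) : ∀ (st : String) (l : List (List String)),
    (xs.foldl stepA (st, l)).2 = l ++ goSpec st xs := by
  induction xs with
  | nil => intro st l; simp [goSpec]
  | cons el xs ih =>
    intro st l
    rw [List.foldl_cons]
    by_cases h : el = "\n"
    · have hs : stepA (st, l) el = ("", l ++ [pySplit st]) := by simp [stepA, h]
      rw [hs, ih, h]
      simp [goSpec]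
    · have hs : stepA (st, l) el = (st ++ el, l) := by simp [stepA, h]
      rw [hs, ih]
      simp [goSpec, h]

lemma goSpec_nil_of_not_mem (xs : List String) (h : "\n" ∉ xs) : ∀ st, goSpec st xs = [] := by
  induction xs with
  | nil => intro st; simp [goSpec]
  | cons el xs ih =>
    intro st
    have hel : el ≠ "\n" := fun he => h (he ▸ List.mem_cons_self)
    have hxs : "\n" ∉ xs := fun hm => h (List.mem_cons_of_mem _ hm)
    simp [goSpec, hel, ih hxs]

lemma chars_join_nil_cons (p : List Char) (l : List (List Char)) :
    PySem.Chars.join [] (p :: l) = p ++ PySem.Chars.join [] l := by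
  cases l <;> simp [PySem.Chars.join_nil, PySem.Chars.join_singleton, PySem.Chars.join_cons_cons]

lemma append_join_nil (st : String) : st ++ PySem.Str.join "" [] = st := by
  apply String.toList_inj.mp
  simp [String.toList_append, PySem.Str.toList_join, PySem.Chars.join_nil]

lemma append_join_cons (st x : String) (pre : List String) :
    (st ++ x) ++ PySem.Str.join "" pre = st ++ PySem.Str.join "" (x :: pre) := by
  apply String.toList_inj.mp
  simp [PySem.Str.toList_join, chars_join_nil_cons]

lemma goSpec_chunk (pre : List String) : ∀ (st : String) (suf : List String), "\n" ∉ pre →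
    goSpec st (pre ++ "\n" :: suf) = pySplit (st ++ PySem.Str.join "" pre) :: goSpec "" suf := by
  induction pre with
  | nil => intro st suf _; simp [goSpec, append_join_nil]
  | cons x pre ih =>
    intro st suf h
    have hx : x ≠ "\n" := fun he => h (he ▸ List.mem_cons_self)
    have hp : "\n" ∉ pre := fun hm => h (List.mem_cons_of_mem _ hm)
    simp only [List.cons_append, goSpec, hx, ite_false]
    rw [ih (st ++ x) suf hp, append_join_cons]

lemma empty_append_str (s : String) : "" ++ s = s := by
  apply String.toList_inj.mp
  simp

lemma altGo_eq_aux (n : Nat) : ∀ (rest : List String), rest.length ≤ n →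
    ∀ (records : List (List String)), filterAltGo records rest = records ++ goSpec "" rest := by
  induction n with
  | zero =>
    intro rest hlen records
    have hr : rest = [] := List.eq_nil_of_length_eq_zero (Nat.le_zero.mp hlen)
    subst hr
    rw [filterAltGo.eq_def]
    split
    · simp [goSpec]
    · rename_i j h
      exfalso
      obtain ⟨pre, suf, hre, -, -⟩ := (PySem.List.index?_eq_some_iff [] "\n" j).mp h
      exact List.cons_ne_nil _ _ (List.append_eq_nil_iff.mp hre.symm).2
  | succ n ihn =>
    intro rest hlen records
    rw [filterAltGo.eq_def]
    split
    · rename_i h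
      rw [PySem.List.index?_eq_none_iff] at h
      simp [goSpec_nil_of_not_mem rest h]
    · rename_i j h
      obtain ⟨pre, suf, hre, hlen2, hnp⟩ := (PySem.List.index?_eq_some_iff rest "\n" j).mp h
      subst hre
      subst hlen2
      have ht : (pre ++ "\n" :: suf).take pre.length = pre := by
        rw [List.take_append_of_le_length (le_refl _), List.take_length]
      have hd : (pre ++ "\n" :: suf).drop (pre.length + 1) = suf := by
        have hs : pre ++ "\n" :: suf = (pre ++ ["\n"]) ++ suf := by simp
        have hl : pre.length + 1 = (pre ++ ["\n"]).length := by simp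
        rw [hs, hl, List.drop_left]
      rw [ht, hd]
      have hsuf : suf.length ≤ n := by
        simp only [List.length_append, List.length_cons] at hlen
        omega
      rw [ihn suf hsuf, goSpec_chunk pre "" suf hnp, empty_append_str]
      simp

lemma altGo_eq (records : List (List String)) (rest : List String) :
    filterAltGo records rest = records ++ goSpec "" rest :=
  altGo_eq_aux rest.length rest (le_refl _) records

-- ===== VERDICT (by name: the statement is the Claim_ definition above) =====
theorem filter_file_spec : Claim_equal_filter_file := by
  intro mlist _
  unfold Spec_filter_file filter_file filter_file_alt
  rw [foldA_eq, altGo_eq]
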